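-- pv_equiv track=rewrite | github.com/WolfWood72/lab4 | Scrembler.py | is_cycled
-- ===== SOURCE A (Python) =====
-- def is_cycled(seq):
--
--     n = len(seq)
--
--     max_cycle_len = n // 2
--
--     for cycle_len in reversed(range(2, max_cycle_len + 1)):
--         interval_num = n // cycle_len
--         interval_example = seq[:cycle_len]
--         cycled = True
--         for i in range(interval_num):
--             cur_interval = seq[i * cycle_len: (i + 1) * cycle_len]
--             m = len(cur_interval)
--             if cur_interval != interval_example[:m]:
--                 cycled = False
--                 break
--
--         if cycled:
--             return cycle_len
--
--     return 0
-- ===== SOURCE B (Python) =====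
-- def is_cycled(seq):
--     n = len(seq)
--     for k in range(n // 2, 1, -1):
--         m = (n // k) * k
--         if seq[k:m] == seq[:m - k]:
--             return k
--     return 0
-- ===== Notes on version B (the rewrite author's own statement) =====
-- stated objective: simpler
-- what changed: Replaces A's nested loop that slices out every length-k block and compares it to the prefix with one shift comparison per candidate period k (seq[k:m] == seq[:m-k] over the tiled region m = (n//k)*k), iterating k downward directly with range(n//2, 1, -1); the proof shows block-tiling equals shift-by-k agreement.
import Mathlib
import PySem

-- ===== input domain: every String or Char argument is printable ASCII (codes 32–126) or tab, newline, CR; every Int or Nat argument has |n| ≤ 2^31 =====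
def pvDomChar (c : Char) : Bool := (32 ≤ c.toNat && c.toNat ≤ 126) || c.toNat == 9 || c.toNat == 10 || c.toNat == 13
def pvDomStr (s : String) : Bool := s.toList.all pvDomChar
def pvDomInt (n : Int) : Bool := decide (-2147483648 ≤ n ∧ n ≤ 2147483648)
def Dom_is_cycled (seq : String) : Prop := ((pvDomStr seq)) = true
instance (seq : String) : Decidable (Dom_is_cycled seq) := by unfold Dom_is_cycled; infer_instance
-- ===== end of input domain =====

-- B replaces A's nested per-block slice-and-compare loop by a single shift comparison seq[k:m] == seq[:m-k] per candidate period k; objective: simpler.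

-- ===== PORT A =====
-- inner 'for i in range(interval_num)' with its break
def aInner (ex : List Char) (cs : List Char) (k : Int) : List Int → Bool
  | [] => true
  | i :: is =>
    let cur := PySem.List.slice cs (some (i * k)) (some ((i + 1) * k))
    let m : Int := (cur.length : Int)
    if cur ≠ PySem.List.slice ex none (some m) then false
    else aInner ex cs k is

-- outer 'for cycle_len in reversed(range(2, max_cycle_len + 1))' with its early return
def aOuter (cs : List Char) (n : Int) : List Int → Int
  | [] => 0
  | k :: rest =>
    let interval_num := PySem.Int.floordiv n k
    let interval_example := PySem.List.slice cs none (some k)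
    if aInner interval_example cs k (PySem.List.pyRange 0 interval_num 1) then k
    else aOuter cs n rest

def is_cycled (seq : String) : Int :=
  let cs := seq.toList
  let n : Int := PySem.Str.len seq
  let max_cycle_len := PySem.Int.floordiv n 2
  aOuter cs n ((PySem.List.pyRange 2 (max_cycle_len + 1) 1).reverse)

-- ===== PORT B =====
-- 'for k in range(n // 2, 1, -1)' with its early return; 'seq[k:m] == seq[:m - k]'
def bOuter (cs : List Char) (n : Int) : List Int → Int
  | [] => 0
  | k :: rest =>
    let m := PySem.Int.floordiv n k * k
    if PySem.List.slice cs (some k) (some m) == PySem.List.slice cs none (some (m - k)) then k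
    else bOuter cs n rest

def is_cycled_alt (seq : String) : Int :=
  let cs := seq.toList
  let n : Int := PySem.Str.len seq
  bOuter cs n (PySem.List.pyRange (PySem.Int.floordiv n 2) 1 (-1))

-- ===== PRECONDITION & SPEC =====
def Spec_is_cycled (seq : String) (out : Int) : Prop := out = is_cycled_alt seq
instance (seq : String) (out : Int) : Decidable (Spec_is_cycled seq out) := by unfold Spec_is_cycled; infer_instance

-- ===== CLAIM (what is proved, stated in full; the proofs are below) =====
def Claim_equal_is_cycled : Prop := ∀ (seq : String), Dom_is_cycled seq → Spec_is_cycled seq (is_cycled seq)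

-- ===== LEMMAS AND PROOFS =====

theorem ainner_eq_all (ex cs : List Char) (k : Int) (l : List Int) :
    aInner ex cs k l = l.all (fun i =>
      PySem.List.slice cs (some (i * k)) (some ((i + 1) * k)) ==
      PySem.List.slice ex none (some (((PySem.List.slice cs (some (i * k)) (some ((i + 1) * k))).length : Int))) ) := by
  induction l with
  | nil => rfl
  | cons i is ih =>
    simp only [aInner, List.all_cons, ih]
    generalize PySem.List.slice cs (some (i * k)) (some ((i + 1) * k)) = cur
    generalize PySem.List.slice ex none (some ((cur.length : Int))) = rhs
    rcases eq_or_ne cur rhs with h | h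
    · simp [h]
    · simp [h]

theorem ainner_iff (cs : List Char) (κ : Nat) (hκ : 1 ≤ κ) :
    (aInner (PySem.List.slice cs none (some (κ : Int))) cs (κ : Int)
        (PySem.List.pyRange 0 ((cs.length / κ : Nat) : Int) 1) = true)
    ↔ (∀ i, i < cs.length / κ → ∀ j, j < κ → cs[i * κ + j]? = cs[j]?) := by
  rw [ainner_eq_all, PySem.List.pyRange_zero_natCast, List.all_map, List.all_eq_true]
  simp only [Function.comp, List.mem_range, beq_iff_eq]
  refine forall_congr' fun i => ?_
  have hc1 : (i : Int) * (κ : Int) = ((i * κ : Nat) : Int) := by push_cast; ring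
  have hc2 : ((i : Int) + 1) * (κ : Int) = (((i + 1) * κ : Nat) : Int) := by push_cast; ring
  have hsub : (i + 1) * κ - i * κ = κ := by rw [Nat.succ_mul]; omega
  refine ⟨fun h hi => ?_, fun h hi => ?_⟩
  · specialize h hi
    have hle : (i + 1) * κ ≤ cs.length := by
      calc (i + 1) * κ ≤ (cs.length / κ) * κ := Nat.mul_le_mul_right _ (by omega)
        _ ≤ cs.length := Nat.div_mul_le_self _ _
    rw [hc1, hc2, PySem.List.slice_natCast, hsub, PySem.List.slice_to_natCast] at h
    have hl2 : (List.take κ (List.drop (i * κ) cs)).length = κ := by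
      simp only [List.length_take, List.length_drop]
      rw [Nat.succ_mul] at hle; omega
    rw [hl2, PySem.List.slice_to_natCast, List.take_take, min_self] at h
    intro j hj
    have hpt := congrArg (fun l => l[j]?) h
    simpa [List.getElem?_take, List.getElem?_drop, hj] using hpt
  · specialize h hi
    have hle : (i + 1) * κ ≤ cs.length := by
      calc (i + 1) * κ ≤ (cs.length / κ) * κ := Nat.mul_le_mul_right _ (by omega)
        _ ≤ cs.length := Nat.div_mul_le_self _ _
    rw [hc1, hc2, PySem.List.slice_natCast, hsub, PySem.List.slice_to_natCast]
    have hl2 : (List.take κ (List.drop (i * κ) cs)).length = κ := by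
      simp only [List.length_take, List.length_drop]
      rw [Nat.succ_mul] at hle; omega
    rw [hl2, PySem.List.slice_to_natCast, List.take_take, min_self]
    apply List.ext_getElem?
    intro j
    rw [List.getElem?_take, List.getElem?_take, List.getElem?_drop]
    by_cases hj : j < κ
    · simp only [if_pos hj]; exact h j hj
    · simp [hj]
theorem blocks_iff_shift (cs : List Char) (κ : Nat) (hκ : 1 ≤ κ) :
    (∀ i, i < cs.length / κ → ∀ j, j < κ → cs[i * κ + j]? = cs[j]?)
    ↔ (∀ t, κ + t < (cs.length / κ) * κ → cs[κ + t]? = cs[t]?) := by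
  set q := cs.length / κ with hq
  constructor
  · intro h t ht
    set i := t / κ with hi
    set j := t % κ with hj
    have hjκ : j < κ := Nat.mod_lt _ hκ
    have hdm : i * κ + j = t := by rw [Nat.mul_comm]; exact Nat.div_add_mod t κ
    have hi1 : (i + 1) * κ < q * κ := by nlinarith [hdm, ht]
    have hiq1 : i + 1 < q := Nat.lt_of_mul_lt_mul_right hi1
    have e1 : κ + t = (i + 1) * κ + j := by rw [Nat.succ_mul]; omega
    have e2 : t = i * κ + j := hdm.symm
    rw [e1, e2, h (i+1) hiq1 j hjκ, h i (by omega) j hjκ]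
  · intro h i
    induction i with
    | zero => intro _ j hj; simp
    | succ i ih =>
      intro hiq j hj
      have hstep : cs[(i + 1) * κ + j]? = cs[i * κ + j]? := by
        have e1 : κ + (i * κ + j) = (i + 1) * κ + j := by rw [Nat.succ_mul]; omega
        have hb : κ + (i * κ + j) < q * κ := by
          have : (i + 2) * κ ≤ q * κ := Nat.mul_le_mul_right _ (by omega)
          nlinarith
        rw [← e1]
        exact h _ hb
      rw [hstep]
      exact ih (by omega) j hj
theorem bslice_iff (cs : List Char) (κ q : Nat) (h1 : κ ≤ q * κ) :
    ((PySem.List.slice cs (some (κ : Int)) (some ((q * κ : Nat) : Int)) ==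
      PySem.List.slice cs none (some (((q * κ : Nat) : Int) - (κ : Int)))) = true)
    ↔ (∀ t, κ + t < q * κ → cs[κ + t]? = cs[t]?) := by
  have hc : ((q * κ : Nat) : Int) - (κ : Int) = ((q * κ - κ : Nat) : Int) := by omega
  rw [hc, PySem.List.slice_natCast, PySem.List.slice_to_natCast, beq_iff_eq]
  constructor
  · intro h t ht
    have hpt := congrArg (fun l => l[t]?) h
    simp only [List.getElem?_take, List.getElem?_drop] at hpt
    rw [if_pos (by omega), if_pos (by omega)] at hpt
    exact hpt
  · intro h
    apply List.ext_getElem?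
    intro t
    rw [List.getElem?_take, List.getElem?_take, List.getElem?_drop]
    by_cases htb : t < q * κ - κ
    · rw [if_pos htb, if_pos htb]; exact h t (by omega)
    · rw [if_neg htb, if_neg htb]

theorem outer_eq (cs : List Char) (l : List Int)
    (hl : ∀ k ∈ l, 2 ≤ k ∧ k ≤ ((cs.length / 2 : Nat) : Int)) :
    aOuter cs (cs.length : Int) l = bOuter cs (cs.length : Int) l := by
  induction l with
  | nil => rfl
  | cons k rest ih =>
    obtain ⟨h2, hhalf⟩ := hl k (by simp)
    obtain ⟨κ, hk⟩ : ∃ κ : Nat, (κ : Int) = k := ⟨k.toNat, Int.toNat_of_nonneg (by omega)⟩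
    subst hk
    have h2' : 1 ≤ κ := by omega
    have hκlen : κ ≤ cs.length := by
      have : κ ≤ cs.length / 2 := by exact_mod_cast hhalf
      omega
    have h1 : κ ≤ (cs.length / κ) * κ := by
      have hq1 : 1 ≤ cs.length / κ := (Nat.one_le_div_iff (by omega)).mpr hκlen
      calc κ = 1 * κ := (one_mul κ).symm
        _ ≤ (cs.length / κ) * κ := Nat.mul_le_mul_right _ hq1
    simp only [aOuter, bOuter]
    rw [PySem.Int.floordiv_natCast]
    have hm : ((cs.length / κ : Nat) : Int) * (κ : Int) = (((cs.length / κ) * κ : Nat) : Int) := by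
      push_cast; ring
    rw [hm]
    have hcond : (aInner (PySem.List.slice cs none (some (κ : Int))) cs (κ : Int)
          (PySem.List.pyRange 0 ((cs.length / κ : Nat) : Int) 1))
        = (PySem.List.slice cs (some (κ : Int)) (some (((cs.length / κ) * κ : Nat) : Int)) ==
           PySem.List.slice cs none (some ((((cs.length / κ) * κ : Nat) : Int) - (κ : Int)))) := by
      rw [Bool.eq_iff_iff, ainner_iff cs κ h2', bslice_iff cs κ (cs.length / κ) h1]
      exact blocks_iff_shift cs κ h2'
    rw [hcond, ih (fun k hk => hl k (by simp [hk]))]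

-- ===== VERDICT (by name: the statement is the Claim_ definition above) =====
theorem is_cycled_spec : Claim_equal_is_cycled := by
  intro seq _
  unfold Spec_is_cycled is_cycled is_cycled_alt
  simp only [PySem.Str.len_eq]
  rw [PySem.List.pyRange_neg_one_eq_reverse]
  have hfd : PySem.Int.floordiv ((seq.toList.length : Nat) : Int) 2 =
      ((seq.toList.length / 2 : Nat) : Int) := by
    exact_mod_cast PySem.Int.floordiv_natCast seq.toList.length 2
  refine outer_eq _ _ (fun k hk => ?_)
  rw [List.mem_reverse, PySem.List.mem_pyRange_one, hfd] at hk
  exact ⟨hk.1, by omega⟩
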